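-- pv_equiv track=rewrite | github.com/daniel-reich/ubiquitous-fiesta | hQRuQguN4bKyM2gik_19.py | simple_check
-- ===== SOURCE A (Python) =====
-- def simple_check(a, b):
--   a, b = sorted([a,b])
--   c = 0
--   while a != 0:
--     c += not b%a
--     a -= 1
--     b -= 1
--   return c
-- ===== SOURCE B (Python) =====
-- def simple_check(a, b):
--     m, big = (a, b) if a <= b else (b, a)
--     d = big - m
--     if d == 0:
--         return m
--     c = 0
--     i = 1
--     while i * i <= d:
--         if d % i == 0:
--             if i <= m:
--                 c += 1
--             j = d // i
--             if j != i and j <= m: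
--                 c += 1
--         i += 1
--     return c
-- ===== Notes on version B (the rewrite author's own statement) =====
-- stated objective: faster
-- what changed: Instead of scanning all candidates 1..min(a,b) (A's while loop decrementing both numbers), B enumerates divisors of d = |b-a| in pairs up to sqrt(d), counting each divisor and its cofactor that are <= min(a,b); the d == 0 case returns min(a,b) directly.
import Mathlib
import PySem

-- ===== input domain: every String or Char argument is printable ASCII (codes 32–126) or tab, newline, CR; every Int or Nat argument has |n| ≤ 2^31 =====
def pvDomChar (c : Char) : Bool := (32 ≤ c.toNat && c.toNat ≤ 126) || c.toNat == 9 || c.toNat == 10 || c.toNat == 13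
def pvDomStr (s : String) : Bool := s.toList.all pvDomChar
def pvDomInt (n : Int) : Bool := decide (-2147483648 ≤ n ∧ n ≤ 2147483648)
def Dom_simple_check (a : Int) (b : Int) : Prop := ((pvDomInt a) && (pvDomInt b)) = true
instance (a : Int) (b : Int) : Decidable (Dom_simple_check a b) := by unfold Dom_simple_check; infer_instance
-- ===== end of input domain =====

-- B replaces A's scan of all candidates 1..min(a,b) by enumerating divisor pairs of d = |b-a| up to sqrt(d) (d = 0 returns min(a,b) directly); equivalence proved on a,b ≥ 0 (A loops forever when min(a,b) < 0).


-- ===== PORT A =====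
-- while a != 0: c += not b%a; a -= 1; b -= 1
-- (the `0 < a` guard only makes the function total: for a < 0 Python's loop never
--  terminates, and those inputs are excluded by Pre_)
def scLoop (a b c : Int) : Int :=
  if h : 0 < a then
    scLoop (a - 1) (b - 1) (c + (if PySem.Int.mod b a = 0 then 1 else 0))
  else c
termination_by a.toNat
decreasing_by omega

-- a, b = sorted([a, b]) on a two-element list is exactly (min a b, max a b)
def simple_check (a : Int) (b : Int) : Int :=
  scLoop (min a b) (max a b) 0

-- ===== PORT B =====
-- while i*i <= d: if d % i == 0: count i (if <= m) and the cofactor d//i (if distinct and <= m)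
def divLoop (d m : Int) (i : Nat) (c : Int) : Int :=
  if h : (i : Int) * i ≤ d then
    divLoop d m (i + 1)
      (if PySem.Int.mod d i = 0 then
        (c + (if (i : Int) ≤ m then 1 else 0)) +
          (if PySem.Int.floordiv d i ≠ (i : Int) ∧ PySem.Int.floordiv d i ≤ m then 1 else 0)
       else c)
  else c
termination_by (d + 1 - i).toNat
decreasing_by
  rcases Nat.eq_zero_or_pos i with h0 | h0
  · subst h0; simp at h ⊢; omega
  · have h1 : (1 : Int) ≤ (i : Int) := by exact_mod_cast h0
    have h2 : (i : Int) ≤ d := by nlinarith [h1]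
    omega

def simple_check_alt (a : Int) (b : Int) : Int :=
  let m := if a ≤ b then a else b
  let big := if a ≤ b then b else a
  let d := big - m
  if d = 0 then m else divLoop d m 1 0

-- ===== PRECONDITION & SPEC =====
-- Pre_ excludes exactly the inputs with min(a,b) < 0, on which A's while loop never terminates (a -= 1 walks away from 0).
def Pre_simple_check (a : Int) (b : Int) : Prop := 0 ≤ a ∧ 0 ≤ b
instance (a : Int) (b : Int) : Decidable (Pre_simple_check a b) := by unfold Pre_simple_check; infer_instance

def pvWitness_simple_check : Int × Int := (6, 18)

def Spec_simple_check (a : Int) (b : Int) (out : Int) : Prop := out = simple_check_alt a b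
instance (a : Int) (b : Int) (out : Int) : Decidable (Spec_simple_check a b out) := by unfold Spec_simple_check; infer_instance

-- ===== CLAIM (what is proved, stated in full; the proofs are below) =====
def Claim_equal_simple_check : Prop := ∀ (a : Int) (b : Int), Dom_simple_check a b → Pre_simple_check a b → Spec_simple_check a b (simple_check a b)

-- ===== LEMMAS AND PROOFS =====

-- the set both programs count: divisors of d among 1..m
def divSet (d m : Int) : Finset Nat := (Finset.Icc 1 m.toNat).filter (fun k => d % (k : Int) = 0)

-- the divisors not yet counted by divLoop when the loop variable is i
def remSet (d m : Int) (i : Nat) : Finset Nat :=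
  (Finset.Icc 1 m.toNat).filter (fun k => d % (k : Int) = 0 ∧ i ≤ k ∧ (i : Int) * k ≤ d)

theorem scLoop_count (m : Nat) : ∀ (d c : Int),
    scLoop (m : Int) ((m : Int) + d) c = c + (divSet d m).card := by
  induction m with
  | zero =>
    intro d c
    rw [scLoop]
    simp [divSet]
  | succ n ih =>
    intro d c
    rw [scLoop]
    have hpos : (0:Int) < ((n+1 : Nat) : Int) := by positivity
    rw [dif_pos hpos]
    have hmod : PySem.Int.mod ((↑(n+1) : Int) + d) (↑(n+1)) = d % (↑(n+1)) := by
      rw [PySem.Int.mod_eq_emod_of_pos hpos, Int.add_emod_left]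
    have harg1 : ((n+1 : Nat) : Int) - 1 = (n : Int) := by push_cast; ring
    have harg2 : ((n+1 : Nat) : Int) + d - 1 = (n : Int) + d := by push_cast; ring
    rw [hmod, harg1, harg2, ih d]
    have hset : divSet d (n+1 : Nat) = if d % ((n+1 : Nat) : Int) = 0 then insert (n+1) (divSet d n) else divSet d n := by
      unfold divSet
      rw [show ((n+1 : Nat) : Int).toNat = n + 1 by omega,
          show ((n : Nat) : Int).toNat = n by omega,
          ← Order.succ_eq_add_one, ← Finset.insert_Icc_right_eq_Icc_succ (by simp), Finset.filter_insert]
    rw [hset]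
    by_cases hd : d % ((n+1 : Nat) : Int) = 0
    · rw [if_pos hd, if_pos hd, Finset.card_insert_of_notMem (by simp [divSet])]
      push_cast; ring
    · rw [if_neg hd, if_neg hd]; ring

theorem divLoop_count (d m : Int) (i : Nat) (c : Int) (_hd : 0 < d) :
    1 ≤ i → divLoop d m i c = c + (remSet d m i).card := by
  induction i, c using divLoop.induct d m with
  | case2 i c h =>
    intro hi
    rw [divLoop, dif_neg h]
    have hempty : remSet d m i = ∅ := by
      ext k
      simp only [remSet, Finset.mem_filter, Finset.mem_Icc, Finset.notMem_empty, iff_false, not_and]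
      intro hk hmod hik
      have h1 : (i : Int) ≤ (k : Int) := by exact_mod_cast hik
      have h0 : (0 : Int) ≤ i := by positivity
      intro hikd
      exact h (by nlinarith)
    rw [hempty]; simp
  | case1 i c h ih =>
    intro hi
    have hipos : (0 : Int) < (i : Int) := by exact_mod_cast hi
    rw [divLoop, dif_pos h]
    simp only [dite_eq_ite] at ih
    rw [ih (by omega)]
    rw [PySem.Int.mod_eq_emod_of_pos hipos, PySem.Int.floordiv_eq_ediv_of_pos hipos]
    -- cofactor bound: i ≤ d / i
    have hdi_ge : (i : Int) ≤ d / i := (Int.le_ediv_iff_mul_le hipos).mpr h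
    have hsub : remSet d m (i+1) ⊆ remSet d m i := by
      intro k
      simp only [remSet, Finset.mem_filter, Finset.mem_Icc]
      rintro ⟨hk, hmod, hik, hikd⟩
      have hk0 : (0 : Int) ≤ (k : Int) := by positivity
      refine ⟨hk, hmod, by omega, ?_⟩
      have : ((i : Int) + 1) * k ≤ d := by push_cast at hikd ⊢; linarith
      nlinarith
    have hcard := Finset.card_sdiff_add_card_eq_card hsub
    -- characterize the removed elements
    have hdiff : ∀ k : Nat, k ∈ remSet d m i \ remSet d m (i+1) ↔
        d % (i : Int) = 0 ∧ (((k : Int) = i ∧ (i : Int) ≤ m) ∨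
          ((k : Int) = d / i ∧ d / i ≠ (i : Int) ∧ d / i ≤ m)) := by
      intro k
      simp only [Finset.mem_sdiff, remSet, Finset.mem_filter, Finset.mem_Icc, not_and]
      constructor
      · rintro ⟨⟨⟨hk1, hk2⟩, hmod, hik, hikd⟩, hnot⟩
        have hkpos : (0 : Int) < (k : Int) := by exact_mod_cast hk1
        have hkm : (k : Int) ≤ m := by omega
        have hdvd : (k : Int) ∣ d := Int.dvd_of_emod_eq_zero hmod
        obtain ⟨q, hq⟩ := hdvd
        have hiq : (i : Int) ≤ q := by nlinarith
        rcases Nat.lt_or_ge k (i+1) with hcase | hcase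
        · -- k = i
          have hk_eq : (k : Int) = i := by omega
          refine ⟨by rwa [← hk_eq], Or.inl ⟨hk_eq, by omega⟩⟩
        · -- failure must be (i+1)*k > d, forcing q = i
          have hfail := hnot ⟨hk1, hk2⟩ hmod hcase
          have hlt : d < ((i : Int) + 1) * k := by
            push_cast at hfail ⊢; omega
          have hqi : q = i := by nlinarith
          subst hqi
          have hmod_i : d % (i : Int) = 0 :=
            Int.emod_eq_zero_of_dvd ⟨k, by rw [hq]; ring⟩
          have hdiv : d / (i : Int) = k := by
            rw [hq, mul_comm, Int.mul_ediv_cancel_left _ (by omega)]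
          refine ⟨hmod_i, ?_⟩
          rcases eq_or_ne (k : Int) (i : Int) with he | he
          · exact Or.inl ⟨he, by omega⟩
          · exact Or.inr ⟨hdiv.symm, by omega, by omega⟩
      · rintro ⟨hmod_i, hk_or⟩
        have hdvd_i : (i : Int) ∣ d := Int.dvd_of_emod_eq_zero hmod_i
        rcases hk_or with ⟨hk_eq, him⟩ | ⟨hk_eq, hne, hjm⟩
        · have hki : k = i := by exact_mod_cast hk_eq
          subst hki
          refine ⟨⟨⟨by omega, by omega⟩, by rwa [hk_eq] at hmod_i ⊢, le_refl _, h⟩, ?_⟩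
          intro _ _ hik1
          omega
        · -- k is the cofactor d / i
          have hdiv_pos : (0 : Int) < d / i := by omega
          have hd_eq : (i : Int) * (d / i) = d := Int.mul_ediv_cancel' hdvd_i
          have hk_pos : 1 ≤ k := by omega
          have hmod_k : d % (k : Int) = 0 := by
            rw [hk_eq]
            exact Int.emod_eq_zero_of_dvd (Int.ediv_dvd_of_dvd hdvd_i)
          refine ⟨⟨⟨hk_pos, by omega⟩, hmod_k, by omega, ?_⟩, ?_⟩
          · rw [hk_eq, hd_eq]
          · intro _ _ hik1
            push_cast
            rw [hk_eq]
            have : ((i : Int) + 1) * (d / i) > d := by nlinarith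
            omega
    -- now split on the contribution
    by_cases hmod : d % (i : Int) = 0
    · rw [if_pos hmod]
      by_cases h1 : (i : Int) ≤ m <;> by_cases h2 : d / i ≠ (i : Int) ∧ d / i ≤ m
      · -- both counted
        rw [if_pos h1, if_pos h2]
        have hcard2 : (remSet d m i \ remSet d m (i+1)).card = 2 := by
          rw [Finset.card_eq_two]
          refine ⟨i, (d / i).toNat, by omega, ?_⟩
          ext k
          rw [hdiff k]
          simp only [Finset.mem_insert, Finset.mem_singleton]
          constructor
          · rintro ⟨-, ⟨hk, -⟩ | ⟨hk, -⟩⟩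
            · left; exact_mod_cast hk
            · right; omega
          · rintro (rfl | rfl)
            · exact ⟨hmod, Or.inl ⟨rfl, h1⟩⟩
            · exact ⟨hmod, Or.inr ⟨by omega, h2.1, h2.2⟩⟩
        omega
      · rw [if_pos h1, if_neg h2]
        have hcard1 : (remSet d m i \ remSet d m (i+1)).card = 1 := by
          rw [Finset.card_eq_one]
          refine ⟨i, ?_⟩
          ext k
          rw [hdiff k]
          simp only [Finset.mem_singleton]
          constructor
          · rintro ⟨-, ⟨hk, -⟩ | ⟨hk, hne, hjm⟩⟩
            · exact_mod_cast hk
            · exact absurd ⟨hne, hjm⟩ h2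
          · rintro rfl
            exact ⟨hmod, Or.inl ⟨rfl, h1⟩⟩
        omega
      · rw [if_neg h1, if_pos h2]
        have hcard1 : (remSet d m i \ remSet d m (i+1)).card = 1 := by
          rw [Finset.card_eq_one]
          refine ⟨(d / i).toNat, ?_⟩
          ext k
          rw [hdiff k]
          simp only [Finset.mem_singleton]
          constructor
          · rintro ⟨-, ⟨hk, him⟩ | ⟨hk, -⟩⟩
            · exact absurd him h1
            · omega
          · rintro rfl
            exact ⟨hmod, Or.inr ⟨by omega, h2.1, h2.2⟩⟩
        omega
      · rw [if_neg h1, if_neg h2]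
        have hcard0 : (remSet d m i \ remSet d m (i+1)).card = 0 := by
          rw [Finset.card_eq_zero]
          ext k
          rw [hdiff k]
          simp only [Finset.notMem_empty, iff_false]
          rintro ⟨-, ⟨hk, him⟩ | ⟨hk, hne, hjm⟩⟩
          · exact h1 him
          · exact h2 ⟨hne, hjm⟩
        omega
    · rw [if_neg hmod]
      have hcard0 : (remSet d m i \ remSet d m (i+1)).card = 0 := by
        rw [Finset.card_eq_zero]
        ext k
        rw [hdiff k]
        simp only [Finset.notMem_empty, iff_false]
        rintro ⟨hm, -⟩
        exact hmod hm
      omega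

theorem remSet_one (d m : Int) (hd : 0 < d) : remSet d m 1 = divSet d m := by
  ext k
  simp only [remSet, divSet, Finset.mem_filter, Finset.mem_Icc]
  constructor
  · rintro ⟨hk, hmod, -, -⟩
    exact ⟨hk, hmod⟩
  · rintro ⟨⟨hk1, hk2⟩, hmod⟩
    refine ⟨⟨hk1, hk2⟩, hmod, hk1, ?_⟩
    have hkd : (k : Int) ≤ d := Int.le_of_dvd hd (Int.dvd_of_emod_eq_zero hmod)
    omega

theorem divSet_zero (m : Int) : ((divSet 0 m).card : Int) = max m 0 := by
  unfold divSet
  have : (Finset.Icc 1 m.toNat).filter (fun k : Nat => (0 : Int) % (k : Int) = 0) = Finset.Icc 1 m.toNat := by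
    apply Finset.filter_true_of_mem
    intro k _
    exact Int.zero_emod _
  rw [this, Nat.card_Icc]
  omega

-- ===== VERDICT (by name: the statement is the Claim_ definition above) =====
theorem simple_check_spec : Claim_equal_simple_check := by
  intro a b _ hpre
  obtain ⟨ha, hb⟩ := hpre
  unfold Spec_simple_check simple_check simple_check_alt
  simp only [← min_def, ← max_def]
  set m := min a b with hm
  set M := max a b with hM
  have hm0 : 0 ≤ m := le_min ha hb
  have hmM : m ≤ M := min_le_max
  obtain ⟨n, hn⟩ : ∃ n : Nat, m = (n : Int) := ⟨m.toNat, (Int.toNat_of_nonneg hm0).symm⟩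
  have hMn : M = (n : Int) + (M - m) := by omega
  have key := scLoop_count n (M - m) 0
  rw [← hn, show m + (M - m) = M by ring] at key
  rw [key]
  by_cases hd : M - m = 0
  · rw [if_pos hd, hd, divSet_zero]
    omega
  · have hdpos : 0 < M - m := by omega
    rw [if_neg hd, divLoop_count (M - m) m 1 0 hdpos (le_refl 1), remSet_one (M - m) m hdpos]
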